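-- pv_equiv track=rewrite | github.com/Evedel/toptechs-public | scrap/test_scrapper.py | del_leq_zero
-- ===== SOURCE A (Python) =====
-- def del_leq_zero(tmpdict):
--   delids = []
--   for t in tmpdict:
--     if (tmpdict[t] < 1):
--         delids.append(t)
--   for did in delids:
--     del tmpdict[did]
--   return tmpdict
-- ===== SOURCE B (Python) =====
-- def del_leq_zero(tmpdict):
--     # Drain the whole dict onto a stack via popitem() (pops from the end),
--     # then pop the stack back (restoring original order), reinserting only
--     # the entries whose value is at least 1. Same object is returned.
--     stack = []
--     while tmpdict:
--         stack.append(tmpdict.popitem())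
--     while stack:
--         k, v = stack.pop()
--         if v >= 1:
--             tmpdict[k] = v
--     return tmpdict
-- ===== Notes on version B (the rewrite author's own statement) =====
-- stated objective: alternative
-- what changed: Replaces A's collect-offending-keys-then-delete with a stack-based drain-and-rebuild: popitem() empties the dict onto a stack, then popping the stack reinserts (in original order) only the entries with value >= 1.
import Mathlib
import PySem

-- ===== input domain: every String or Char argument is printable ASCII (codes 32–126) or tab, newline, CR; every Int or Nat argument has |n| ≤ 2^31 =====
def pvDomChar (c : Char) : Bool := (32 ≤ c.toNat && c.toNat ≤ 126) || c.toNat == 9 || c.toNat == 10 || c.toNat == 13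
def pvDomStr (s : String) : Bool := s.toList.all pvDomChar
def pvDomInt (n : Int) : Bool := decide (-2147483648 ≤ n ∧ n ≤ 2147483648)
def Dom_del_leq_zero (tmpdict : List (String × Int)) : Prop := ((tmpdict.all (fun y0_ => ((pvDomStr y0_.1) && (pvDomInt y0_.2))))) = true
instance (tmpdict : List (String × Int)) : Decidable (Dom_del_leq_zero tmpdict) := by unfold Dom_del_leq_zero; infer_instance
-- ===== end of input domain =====

-- B replaces A's collect-offending-keys-then-delete with a stack-based drain-and-rebuild:
-- popitem() empties the dict onto a stack, then popping the stack reinserts (in original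
-- order) only the entries whose value is >= 1; objective: alternative.
-- Return-value equivalence only: A mutates its argument in place, B performs the same mutation.


-- ===== PORT A =====
-- for t in tmpdict: if tmpdict[t] < 1: delids.append(t);  then for did in delids: del tmpdict[did]
def del_leq_zero (tmpdict : List (String × Int)) : List (String × Int) :=
  let d := PySem.Dict.mk tmpdict
  let delids : List String :=
    tmpdict.foldl (fun acc t => if d.getD t.1 0 < 1 then acc ++ [t.1] else acc) []
  (delids.foldl (fun d' did => PySem.Dict.erase d' did) d).items

-- ===== PORT B =====
-- while tmpdict: stack.append(tmpdict.popitem())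
-- d.popitem() removes and returns the LAST item: modelled exactly as the last pair of
-- d.items plus the dict whose items are d.items.dropLast.
def del_leq_zero_drain (d : PySem.Dict String Int) (stack : List (String × Int)) :
    List (String × Int) :=
  match h : d.items.getLast? with
  | none => stack
  | some p => del_leq_zero_drain (PySem.Dict.mk d.items.dropLast) (stack ++ [p])
termination_by d.items.length
decreasing_by
  have hne : d.items ≠ [] := by intro he; rw [he] at h; simp at h
  have hpos := List.length_pos_of_ne_nil hne
  simp only [List.length_dropLast]
  omega

-- while stack: k, v = stack.pop();  if v >= 1: tmpdict[k] = v   (pop = from the end)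
def del_leq_zero_rebuild (stack : List (String × Int)) (d : PySem.Dict String Int) :
    PySem.Dict String Int :=
  match h : stack.getLast? with
  | none => d
  | some p => del_leq_zero_rebuild stack.dropLast (if 1 ≤ p.2 then d.insert p.1 p.2 else d)
termination_by stack.length
decreasing_by
  have hne : stack ≠ [] := by intro he; rw [he] at h; simp at h
  have : stack.length ≠ 0 := by simpa using List.length_pos_of_ne_nil hne |>.ne'
  simp only [List.length_dropLast]
  omega

def del_leq_zero_alt (tmpdict : List (String × Int)) : List (String × Int) :=
  (del_leq_zero_rebuild (del_leq_zero_drain (PySem.Dict.mk tmpdict) []) PySem.Dict.empty).items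

-- ===== PRECONDITION & SPEC =====
-- Pre_ requires the association list to have pairwise-distinct keys: the Python argument is a
-- dict, which cannot hold duplicate keys, so this excludes no input A can actually receive.
def Pre_del_leq_zero (tmpdict : List (String × Int)) : Prop := (tmpdict.map Prod.fst).Nodup
instance (tmpdict : List (String × Int)) : Decidable (Pre_del_leq_zero tmpdict) := by unfold Pre_del_leq_zero; infer_instance
def pvWitness_del_leq_zero : (List (String × Int)) := [("a", 1), ("b", 0), ("c", -2)]

def Spec_del_leq_zero (tmpdict : List (String × Int)) (out : List (String × Int)) : Prop := out = del_leq_zero_alt tmpdict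
instance (tmpdict : List (String × Int)) (out : List (String × Int)) : Decidable (Spec_del_leq_zero tmpdict out) := by unfold Spec_del_leq_zero; infer_instance

-- ===== CLAIM (what is proved, stated in full; the proofs are below) =====
def Claim_equal_del_leq_zero : Prop := ∀ (tmpdict : List (String × Int)), Dom_del_leq_zero tmpdict → Pre_del_leq_zero tmpdict → Spec_del_leq_zero tmpdict (del_leq_zero tmpdict)

-- ===== LEMMAS AND PROOFS =====

-- Erasing every key in ks removes exactly the pairs whose key lies in ks.
theorem items_fold_erase (ks : List String) (d : PySem.Dict String Int) :
    (ks.foldl (fun d' did => PySem.Dict.erase d' did) d).items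
      = d.items.filter (fun p => !(ks.contains p.1)) := by
  induction ks generalizing d with
  | nil => simp
  | cons k t ih =>
    rw [List.foldl_cons, ih]
    simp only [PySem.Dict.erase, List.filter_filter]
    apply List.filter_congr
    intro p _
    simp only [List.contains_cons]
    cases h : (p.1 == k) <;> cases h2 : (t.contains p.1) <;> simp_all

-- The drain loop moves the items, last first, onto the stack.
theorem drain_eq (n : Nat) (d : PySem.Dict String Int) (stack : List (String × Int))
    (hn : d.items.length ≤ n) :
    del_leq_zero_drain d stack = stack ++ d.items.reverse := by
  induction n generalizing d stack with
  | zero =>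
    have he : d.items = [] := List.eq_nil_of_length_eq_zero (Nat.le_zero.1 hn)
    rw [del_leq_zero_drain]
    split <;> simp_all
  | succ m ih =>
    rw [del_leq_zero_drain]
    cases hl : d.items.getLast? with
    | none =>
      simp only
      rw [List.getLast?_eq_none_iff.1 hl]
      simp
    | some p =>
      simp only
      have hne : d.items ≠ [] := by intro he; rw [he] at hl; simp at hl
      have hsplit : d.items.dropLast ++ [p] = d.items := by
        have := List.dropLast_concat_getLast hne
        rwa [List.getLast_eq_iff_getLast?_eq_some hne |>.2 hl] at this
      have hlen : (PySem.Dict.mk d.items.dropLast).items.length ≤ m := by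
        simp only [List.length_dropLast]
        have := List.length_pos_of_ne_nil hne
        omega
      rw [ih _ _ hlen]
      have : d.items.reverse = p :: d.items.dropLast.reverse := by
        rw [← hsplit]; simp
      simp [this]

-- The rebuild loop pops the stack back, folding the (insert if ≥ 1) step over its reverse.
theorem rebuild_eq (n : Nat) (stack : List (String × Int)) (d : PySem.Dict String Int)
    (hn : stack.length ≤ n) :
    del_leq_zero_rebuild stack d
      = stack.reverse.foldl (fun acc kv => if 1 ≤ kv.2 then acc.insert kv.1 kv.2 else acc) d := by
  induction n generalizing stack d with
  | zero =>
    have he : stack = [] := List.eq_nil_of_length_eq_zero (Nat.le_zero.1 hn)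
    rw [del_leq_zero_rebuild]
    split <;> simp_all
  | succ m ih =>
    rw [del_leq_zero_rebuild]
    cases hl : stack.getLast? with
    | none =>
      simp only
      rw [List.getLast?_eq_none_iff.1 hl]
      simp
    | some p =>
      simp only
      have hne : stack ≠ [] := by intro he; rw [he] at hl; simp at hl
      have hsplit : stack.dropLast ++ [p] = stack := by
        have := List.dropLast_concat_getLast hne
        rwa [List.getLast_eq_iff_getLast?_eq_some hne |>.2 hl] at this
      have hlen : stack.dropLast.length ≤ m := by
        simp only [List.length_dropLast]
        have := List.length_pos_of_ne_nil hne
        omega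
      rw [ih _ _ hlen]
      have : stack.reverse = p :: stack.dropLast.reverse := by
        rw [← hsplit]; simp
      simp [this]

-- A loop of fresh-key inserts appends exactly the kept pairs.
theorem items_fold_insert (l : List (String × Int)) (d : PySem.Dict String Int)
    (hn : (l.map Prod.fst).Nodup) (hd : ∀ p ∈ l, d.contains p.1 = false) :
    (l.foldl (fun acc kv => if 1 ≤ kv.2 then acc.insert kv.1 kv.2 else acc) d).items
      = d.items ++ l.filter (fun kv => decide (1 ≤ kv.2)) := by
  induction l generalizing d with
  | nil => simp
  | cons kv t ih =>
    simp only [List.map_cons, List.nodup_cons] at hn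
    simp only [List.foldl_cons, List.filter_cons]
    by_cases hv : (1 : Int) ≤ kv.2
    · have hfresh : d.contains kv.1 = false := hd kv (List.mem_cons_self ..)
      rw [if_pos hv, ih _ hn.2, PySem.Dict.items_insert_of_not_contains _ _ hfresh]
      · simp [hv]
      · intro p hp
        rw [PySem.Dict.contains_insert]
        have : p.1 ≠ kv.1 := by
          intro h; exact hn.1 (h ▸ List.mem_map_of_mem hp)
        simp [this, hd p (List.mem_cons_of_mem _ hp)]
    · rw [if_neg hv, ih _ hn.2 (fun p hp => hd p (List.mem_cons_of_mem _ hp))]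
      simp [hv]

theorem del_leq_zero_spec : Claim_equal_del_leq_zero := by
  intro tmpdict _ hpre
  unfold Spec_del_leq_zero del_leq_zero del_leq_zero_alt
  have hkeys : (PySem.Dict.mk tmpdict).keys.Nodup := by
    simpa [PySem.Dict.keys] using hpre
  -- the first loop of A collects exactly the keys of pairs with value < 1 (keys unique)
  have hdelids :
      tmpdict.foldl (fun acc t => if (PySem.Dict.mk tmpdict).getD t.1 0 < 1 then acc ++ [t.1] else acc) []
        = (tmpdict.filter (fun t => decide (t.2 < 1))).map Prod.fst := by
    have hcg := PySem.List.foldl_congr_mem tmpdict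
        (fun acc t => if (PySem.Dict.mk tmpdict).getD t.1 0 < 1 then acc ++ [t.1] else acc)
        (fun acc t => if decide (t.2 < 1) = true then acc ++ [t.1] else acc) []
        (by intro acc t ht
            have hv : (PySem.Dict.mk tmpdict).getD t.1 0 = t.2 :=
              PySem.Dict.getD_of_mem_items (PySem.Dict.mk tmpdict) (by simpa using ht) hkeys 0
            dsimp only
            rw [hv]; simp)
    rw [hcg, PySem.List.foldl_append_if]
    simp
  -- B: drain then rebuild = fold the positive filter over tmpdict into an empty dict
  rw [drain_eq tmpdict.length _ [] (by simp),
      rebuild_eq tmpdict.length _ _ (by simp)]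
  simp only [List.nil_append, List.reverse_reverse]
  rw [items_fold_insert tmpdict PySem.Dict.empty hpre (by intro p _; simp)]
  simp only [hdelids, items_fold_erase]
  apply List.filter_congr
  intro p hp
  have hmem : ((tmpdict.filter (fun t => decide (t.2 < 1))).map Prod.fst).contains p.1
      = decide (p.2 < 1) := by
    by_cases hlt : p.2 < 1
    · have hm : p.1 ∈ (tmpdict.filter (fun t => decide (t.2 < 1))).map Prod.fst :=
        List.mem_map.2 ⟨p, List.mem_filter.2 ⟨hp, by simpa using hlt⟩, rfl⟩
      simp [hlt, hm]
    · simp only [hlt, decide_false]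
      rw [Bool.eq_false_iff]
      intro hc
      rw [List.contains_iff_mem] at hc
      obtain ⟨q, hq, hq1⟩ := List.mem_map.1 hc
      obtain ⟨hqmem, hqlt⟩ := List.mem_filter.1 hq
      have : q = p := List.inj_on_of_nodup_map hpre hqmem hp hq1
      exact hlt (by simpa [this] using hqlt)
  rw [hmem]
  by_cases h : p.2 < 1
  · simp [h, Int.not_le.2 h]
  · simp [h, Int.not_lt.1 h]
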